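-- pv_equiv track=rewrite | github.com/daveyb/analogue-images | analogue_image_gen.py | _describe_pocket_db_systems
-- ===== SOURCE A (Python) =====
-- POCKET_SYSTEM_IDS = {
--     0x01: "gb",  # Game Boy (unverified — placeholder)
--     0x02: "gba",  # Game Boy Advance (verified: Advance Wars 2, FE: Sacred Stones)
--     0x03: "gg",  # Game Gear (verified: Ax Battler, Shining Force II)
--     0x04: "gbc",  # Game Boy Color (unverified — placeholder)
--     0x06: "ngp",  # Neo Geo Pocket / Color (verified: Dark Arms, Dive Alert, etc.)
--     0x07: "pce",  # PC Engine / TurboGrafx-16 (verified: Ninja Spirit, Military Madness, etc.)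
-- }
--
-- def _describe_pocket_db_systems(games: list[dict]) -> str:
--     """Return a compact summary of system IDs present in a played-games list.
--
--     Example output: ``"GBA:2  NGP:4  PCE:10"``
--     """
--     seen: dict[int, int] = {}
--     for g in games:
--         seen[g["system_id"]] = seen.get(g["system_id"], 0) + 1
--     parts = []
--     for sid in sorted(seen):
--         key = POCKET_SYSTEM_IDS.get(sid, f"0x{sid:02x}?")
--         parts.append(f"{key.upper()}:{seen[sid]}")
--     return "  ".join(parts) if parts else "(empty)"
-- ===== SOURCE B (Python) =====
-- POCKET_SYSTEM_IDS = {
--     0x01: "gb", 0x02: "gba", 0x03: "gg", 0x04: "gbc", 0x06: "ngp", 0x07: "pce",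
-- }
--
-- def _describe_pocket_db_systems(games: list[dict]) -> str:
--     """Sort the system IDs, then emit one 'KEY:count' part per consecutive run."""
--     sids = sorted(g["system_id"] for g in games)
--     parts = []
--     rest = sids
--     while rest:
--         sid = rest[0]
--         n = 1
--         rest = rest[1:]
--         while rest and rest[0] == sid:
--             n += 1
--             rest = rest[1:]
--         key = POCKET_SYSTEM_IDS.get(sid, f"0x{sid:02x}?")
--         parts.append(f"{key.upper()}:{n}")
--     return "  ".join(parts) if parts else "(empty)"
-- ===== Notes on version B (the rewrite author's own statement) =====
-- stated objective: alternative
-- what changed: Replaces the counting-dict-then-sort-distinct-keys shape by sorting the whole id list once and scanning consecutive runs, emitting one part per run.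
import Mathlib
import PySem

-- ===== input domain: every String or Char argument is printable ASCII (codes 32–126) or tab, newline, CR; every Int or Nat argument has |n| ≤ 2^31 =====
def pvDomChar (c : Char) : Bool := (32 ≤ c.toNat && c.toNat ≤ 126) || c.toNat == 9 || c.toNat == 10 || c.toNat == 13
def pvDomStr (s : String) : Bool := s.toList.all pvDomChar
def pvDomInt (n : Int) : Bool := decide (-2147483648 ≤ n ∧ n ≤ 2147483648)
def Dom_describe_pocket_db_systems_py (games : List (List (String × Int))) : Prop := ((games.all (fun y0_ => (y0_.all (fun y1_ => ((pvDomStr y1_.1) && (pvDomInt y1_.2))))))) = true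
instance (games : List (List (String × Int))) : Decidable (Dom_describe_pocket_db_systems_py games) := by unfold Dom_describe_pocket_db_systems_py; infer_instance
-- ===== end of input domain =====

-- B sorts the whole id list once and scans consecutive runs instead of building a counting
-- dict and sorting its distinct keys (alternative decomposition, same results).

-- shared helpers: both Pythons evaluate the identical expression
-- POCKET_SYSTEM_IDS.get(sid, f"0x{sid:02x}?").upper() + ":" + str(count)

def pocketSystemIds : PySem.Dict Int String :=
  PySem.Dict.mk [(1, "gb"), (2, "gba"), (3, "gg"), (4, "gbc"), (6, "ngp"), (7, "pce")]

def hexDigitChar (n : Nat) : Char :=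
  if n < 10 then Char.ofNat (48 + n) else Char.ofNat (87 + n)

-- f"{n:x}" for n ≥ 0 (lowercase hex, no padding); exact port of CPython hex formatting
def hexNat (n : Nat) : List Char :=
  if _h : n < 16 then [hexDigitChar n]
  else hexNat (n / 16) ++ [hexDigitChar (n % 16)]
  decreasing_by exact Nat.div_lt_self (by omega) (by omega)

-- f"0x{sid:02x}?": hex of |sid|, sign in front, zero-padded to total width 2
def fmt02x (sid : Int) : String :=
  let body : List Char :=
    if sid < 0 then '-' :: hexNat (-sid).toNat
    else if (hexNat sid.toNat).length < 2 then '0' :: hexNat sid.toNat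
    else hexNat sid.toNat
  String.ofList ('0' :: 'x' :: body ++ ['?'])

-- f"{key.upper()}:{cnt}" with key = POCKET_SYSTEM_IDS.get(sid, f"0x{sid:02x}?")
def entryStr (sid : Int) (cnt : Int) : String :=
  PySem.Str.upper ((pocketSystemIds.get? sid).getD (fmt02x sid)) ++ ":" ++ PySem.Int.toStr cnt

-- g["system_id"]: first-match lookup in the association list; none = KeyError
def sidOf? (g : List (String × Int)) : Option Int := (PySem.Dict.mk g).get? "system_id"

-- ===== PORT A =====
-- seen: dict built by seen[g["system_id"]] = seen.get(g["system_id"], 0) + 1 (Option state: none = KeyError);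
-- then parts appended over sorted(seen); seen[sid] ported as getD (the key is present).
def describe_pocket_db_systems_py (games : List (List (String × Int))) : String :=
  let oseen : Option (PySem.Dict Int Int) :=
    games.foldl (fun od g => od.bind (fun d =>
      (sidOf? g).map (fun sid => d.insert sid (d.getD sid 0 + 1)))) (some PySem.Dict.empty)
  match oseen with
  | none => ""   -- KeyError; excluded by Pre_
  | some seen =>
    let parts : List String :=
      (PySem.List.sorted seen.keys (fun x => x) false).foldl
        (fun acc sid => acc ++ [entryStr sid (seen.getD sid 0)]) []
    if parts = [] then "(empty)" else PySem.Str.join "  " parts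

-- ===== PORT B =====
-- run scan: sid = rest[0]; n counts while rest[0] == sid (takeWhile); rest advances past the run (dropWhile)
def runsB : List Int → List (Int × Int)
  | [] => []
  | a :: t =>
    (a, 1 + ((t.takeWhile (fun x => x == a)).length : Int)) ::
      runsB (t.dropWhile (fun x => x == a))
  termination_by s => s.length
  decreasing_by
    simpa using Nat.lt_succ_of_le (List.length_dropWhile_le _ _)

def describe_pocket_db_systems_py_alt (games : List (List (String × Int))) : String :=
  let osids : Option (List Int) :=
    games.foldl (fun ol g => ol.bind (fun l =>
      (sidOf? g).map (fun sid => l ++ [sid]))) (some [])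
  match osids with
  | none => ""   -- KeyError; excluded by Pre_
  | some sids =>
    let parts : List String :=
      (runsB (PySem.List.sorted sids (fun x => x) false)).map (fun p => entryStr p.1 p.2)
    if parts = [] then "(empty)" else PySem.Str.join "  " parts

-- ===== PRECONDITION & SPEC =====
-- A raises KeyError when some game dict lacks the key "system_id"; exactly those inputs are excluded.
def Pre_describe_pocket_db_systems_py (games : List (List (String × Int))) : Prop :=
  ∀ g ∈ games, ("system_id" : String) ∈ g.map Prod.fst
instance (games : List (List (String × Int))) : Decidable (Pre_describe_pocket_db_systems_py games) := by unfold Pre_describe_pocket_db_systems_py; infer_instance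

def pvWitness_describe_pocket_db_systems_py : (List (List (String × Int))) :=
  [[("system_id", 2)], [("system_id", 7)], [("system_id", 2)]]

def Spec_describe_pocket_db_systems_py (games : List (List (String × Int))) (out : String) : Prop := out = describe_pocket_db_systems_py_alt games
instance (games : List (List (String × Int))) (out : String) : Decidable (Spec_describe_pocket_db_systems_py games out) := by unfold Spec_describe_pocket_db_systems_py; infer_instance

-- ===== CLAIM (what is proved, stated in full; the proofs are below) =====
def Claim_equal_describe_pocket_db_systems_py : Prop := ∀ (games : List (List (String × Int))), Dom_describe_pocket_db_systems_py games → Pre_describe_pocket_db_systems_py games → Spec_describe_pocket_db_systems_py games (describe_pocket_db_systems_py games)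

-- ===== LEMMAS AND PROOFS =====

-- the ids extracted in order (total function; agrees with both folds under Pre_)
def sidsOf (games : List (List (String × Int))) : List Int :=
  games.map (fun g => (sidOf? g).getD 0)

lemma sidOf?_eq_some {g : List (String × Int)}
    (h : ("system_id" : String) ∈ g.map Prod.fst) :
    ∃ v, sidOf? g = some v := by
  cases hg : sidOf? g with
  | some v => exact ⟨v, rfl⟩
  | none =>
    exfalso
    have := (PySem.Dict.get?_eq_none_iff_not_mem_keys (PySem.Dict.mk g) ("system_id" : String)).mp hg
    exact this (by simpa [PySem.Dict.keys, PySem.Dict.items] using h)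

lemma foldA_eq (games : List (List (String × Int)))
    (h : ∀ g ∈ games, ("system_id" : String) ∈ g.map Prod.fst)
    (d : PySem.Dict Int Int) :
    games.foldl (fun od g => od.bind (fun d =>
      (sidOf? g).map (fun sid => d.insert sid (d.getD sid 0 + 1)))) (some d)
    = some ((sidsOf games).foldl (fun d x => d.insert x (d.getD x 0 + 1)) d) := by
  induction games generalizing d with
  | nil => rfl
  | cons g gs ih =>
    obtain ⟨v, hv⟩ := sidOf?_eq_some (h g (by simp))
    simp only [List.foldl_cons, hv, Option.bind_some, Option.map_some, sidsOf, List.map_cons,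
      Option.getD_some]
    exact ih (fun g' hg' => h g' (List.mem_cons_of_mem _ hg')) _

lemma foldB_eq (games : List (List (String × Int)))
    (h : ∀ g ∈ games, ("system_id" : String) ∈ g.map Prod.fst)
    (l : List Int) :
    games.foldl (fun ol g => ol.bind (fun l =>
      (sidOf? g).map (fun sid => l ++ [sid]))) (some l)
    = some (l ++ sidsOf games) := by
  induction games generalizing l with
  | nil => simp [sidsOf]
  | cons g gs ih =>
    obtain ⟨v, hv⟩ := sidOf?_eq_some (h g (by simp))
    simp only [List.foldl_cons, hv, Option.bind_some, Option.map_some, sidsOf, List.map_cons,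
      Option.getD_some]
    rw [ih (fun g' hg' => h g' (List.mem_cons_of_mem _ hg'))]
    simp [sidsOf]

lemma head_dropWhile_beq_false {a y : Int} {t ys : List Int}
    (hd : t.dropWhile (fun x => x == a) = y :: ys) : (y == a) = false := by
  induction t with
  | nil => simp at hd
  | cons b bs ihb =>
    by_cases hb : (b == a) = true
    · rw [List.dropWhile_cons] at hd
      rw [if_pos hb] at hd
      exact ihb hd
    · rw [List.dropWhile_cons] at hd
      rw [if_neg hb] at hd
      cases hd
      simpa using hb

-- run scan over a ≤-sorted list: keys strictly increase, cover the list, values are counts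
lemma runs_spec (s : List Int) (h : s.Pairwise (· ≤ ·)) :
    ((runsB s).map Prod.fst).Pairwise (· < ·) ∧
    (∀ x, x ∈ (runsB s).map Prod.fst ↔ x ∈ s) ∧
    (∀ p ∈ runsB s, p.2 = (s.count p.1 : Int)) := by
  induction s using runsB.induct with
  | case1 => simp [runsB]
  | case2 a t ih =>
    have ht : t.Pairwise (· ≤ ·) := h.of_cons
    have hat : ∀ x ∈ t, a ≤ x := fun x hx => List.rel_of_pairwise_cons h hx
    have hdrop : (t.dropWhile (fun x => x == a)).Pairwise (· ≤ ·) :=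
      ht.sublist (List.dropWhile_sublist _)
    -- every element of the dropWhile part is > a
    have hgt : ∀ x ∈ t.dropWhile (fun x => x == a), a < x := by
      intro x hx
      cases hd : t.dropWhile (fun x => x == a) with
      | nil => simp [hd] at hx
      | cons y ys =>
        have hy0 : (y == a) = false := head_dropWhile_beq_false hd
        have hya : a < y := by
          have hymem : y ∈ t.dropWhile (fun x => x == a) := by rw [hd]; simp
          have hyt : y ∈ t := (List.dropWhile_sublist _).mem hymem
          have := hat y hyt
          have hay : a ≠ y := by intro e; subst e; simp at hy0
          omega
        rw [hd] at hx
        rcases List.mem_cons.mp hx with rfl | hxys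
        · exact hya
        · have : y ≤ x := List.rel_of_pairwise_cons (by simpa [hd] using hdrop) hxys
          omega
    obtain ⟨ih1, ih2, ih3⟩ := ih hdrop
    have htw : ∀ x ∈ t.takeWhile (fun x => x == a), x = a := by
      intro x hx
      simpa using List.mem_takeWhile_imp hx
    have hsplit : t = t.takeWhile (fun x => x == a) ++ t.dropWhile (fun x => x == a) :=
      (List.takeWhile_append_dropWhile).symm
    have hanotdrop : a ∉ t.dropWhile (fun x => x == a) := fun hmem => by
      have := hgt a hmem; omega
    have hcounta : (a :: t).count a
        = 1 + (t.takeWhile (fun x => x == a)).length := by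
      rw [List.count_cons_self]
      conv_lhs => rw [hsplit]
      rw [List.count_append]
      have h1 : (t.takeWhile (fun x => x == a)).count a
          = (t.takeWhile (fun x => x == a)).length :=
        List.count_eq_length.mpr (fun x hx => by simp [htw x hx])
      have h2 : (t.dropWhile (fun x => x == a)).count a = 0 :=
        List.count_eq_zero.mpr hanotdrop
      omega
    refine ⟨?_, ?_, ?_⟩
    · simp only [runsB, List.map_cons]
      exact List.pairwise_cons.mpr ⟨by intro x hx; exact hgt _ ((ih2 x).mp hx), ih1⟩
    · intro x
      simp only [runsB, List.map_cons, List.mem_cons, ih2]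
      constructor
      · rintro (rfl | hx)
        · simp
        · have := (List.dropWhile_sublist (l := t) (p := fun x => x == a)).mem hx
          simp [this]
      · rintro (rfl | hx)
        · left; rfl
        · by_cases hxa : x = a
          · left; exact hxa
          · right
            conv at hx => rw [hsplit]
            rcases List.mem_append.mp hx with h1 | h2
            · exact absurd (htw x h1) hxa
            · exact h2
    · intro p hp
      simp only [runsB, List.mem_cons] at hp
      rcases hp with rfl | hp
      · simp only [hcounta]; push_cast; ring
      · have hp1 : p.1 ∈ t.dropWhile (fun x => x == a) := by
          have := (ih2 p.1).mp (List.mem_map_of_mem hp)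
          exact this
        have hne : p.1 ≠ a := fun e => by
          have := hgt p.1 hp1; omega
        have : (a :: t).count p.1 = (t.dropWhile (fun x => x == a)).count p.1 := by
          have h0 : (t.takeWhile (fun x => x == a)).count p.1 = 0 :=
            List.count_eq_zero.mpr (fun hm => hne (htw _ hm))
          calc (a :: t).count p.1 = t.count p.1 := by
                simp [Ne.symm hne]
            _ = (t.dropWhile (fun x => x == a)).count p.1 := by
                conv_lhs => rw [hsplit]
                rw [List.count_append, h0]
                omega
        rw [this]
        exact ih3 p hp

-- ===== VERDICT (by name: the statement is the Claim_ definition above) =====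
theorem describe_pocket_db_systems_py_spec : Claim_equal_describe_pocket_db_systems_py := by
  intro games _ hpre
  unfold Spec_describe_pocket_db_systems_py describe_pocket_db_systems_py describe_pocket_db_systems_py_alt
  rw [foldA_eq games hpre, foldB_eq games hpre]
  simp only [List.nil_append]
  set sids := sidsOf games with hsids
  rw [PySem.Dict.foldl_insert_getD_add_one_eq_counter]
  set s := PySem.List.sorted sids (fun x => x) false with hs
  have hsp : s.Pairwise (· ≤ ·) := PySem.List.sorted_pairwise sids (fun x => x)
  obtain ⟨h1, h2, h3⟩ := runs_spec s hsp
  have hperm : ((runsB s).map Prod.fst).Perm (PySem.Set.ofList sids) := by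
    refine (List.perm_ext_iff_of_nodup (h1.imp ?_) (PySem.Set.nodup_ofList sids)).mpr ?_
    · intro a b hab; omega
    · intro x
      rw [h2 x, PySem.Set.mem_ofList, hs, PySem.List.mem_sorted]
  have hkeys : PySem.List.sorted (PySem.Dict.counter sids).keys (fun x => x) false
      = (runsB s).map Prod.fst := by
    rw [PySem.Dict.keys_counter]
    exact PySem.List.sorted_eq_of_perm_of_pairwise_lt _ _ _ hperm h1
  rw [hkeys, PySem.List.foldl_append_singleton_eq_map, List.nil_append, List.map_map]
  have hcnt : ∀ x, s.count x = sids.count x := fun x =>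
    (PySem.List.sorted_perm sids (fun x => x) false).count_eq x
  have hmap : (runsB s).map
      ((fun sid => entryStr sid ((PySem.Dict.counter sids).getD sid 0)) ∘ Prod.fst)
      = (runsB s).map (fun p => entryStr p.1 p.2) := by
    refine List.map_congr_left ?_
    intro p hp
    simp only [Function.comp_apply, PySem.Dict.getD_counter]
    rw [← hcnt p.1, ← h3 p hp]
  rw [hmap]
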